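-- pv_equiv track=rewrite | github.com/sazzadrupak/python_exercise | justify.py | get_single_line
-- ===== SOURCE A (Python) =====
-- def get_single_line(words, line_length):
--
--     line = ""
--     words_rest = []
--     words_rest += words
--
--     for item in words:
--
--         if len(line)+len(item) <= line_length:
--             line = line + " " + item
--             words_rest.remove(item)
--
--         else:
--             final_line = line[1:len(line)]
--             return final_line, words_rest
--
--         if words_rest is []:
--
--             final_line = line[1:len(line)]
--             return final_line, words_rest
-- ===== SOURCE B (Python) =====
-- def get_single_line(words, line_length):
--     # Single pass with a running length sum; slices instead of repeated list.remove.
--     # Like the original, returns None when every word fits on the line.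
--     total = 0
--     for i, w in enumerate(words):
--         total += len(w) + 1
--         if total > line_length + 1:
--             return " ".join(words[:i]), words[i:]
--     return None
-- ===== Notes on version B (the rewrite author's own statement) =====
-- stated objective: faster
-- what changed: B replaces A's mutable words_rest with repeated O(n) list.remove calls and string re-concatenation by a single pass keeping only a running length sum, producing the line with one ' '.join over a prefix slice and the remainder as a suffix slice (including A's None when every word fits).
import Mathlib
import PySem

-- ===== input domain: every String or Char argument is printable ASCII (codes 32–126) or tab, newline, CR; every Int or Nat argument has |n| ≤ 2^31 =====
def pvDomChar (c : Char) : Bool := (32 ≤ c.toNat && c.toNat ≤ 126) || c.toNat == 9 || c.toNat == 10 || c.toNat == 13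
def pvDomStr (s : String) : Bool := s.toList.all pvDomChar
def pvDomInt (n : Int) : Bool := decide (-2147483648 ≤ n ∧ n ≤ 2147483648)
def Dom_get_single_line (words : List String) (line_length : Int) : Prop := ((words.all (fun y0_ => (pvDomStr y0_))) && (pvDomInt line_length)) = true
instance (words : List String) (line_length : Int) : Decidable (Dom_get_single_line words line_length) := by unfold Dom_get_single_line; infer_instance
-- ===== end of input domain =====

-- B builds the line in one pass with a running length sum and prefix/suffix slices instead of
-- A's quadratic list.remove / string re-concatenation loop; return values agree everywhere,
-- including A's None when every word fits on the line.

-- ===== PORT A =====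
-- the running line is kept as its character list (PySem string functions are defined over List Char)
def get_single_line_go (line_length : Int) (line : List Char) (words_rest : List String) :
    List String → Option (String × List String)
  | [] => none   -- the for loop ends without hitting `else`: Python falls off and returns None
  | item :: tl =>
    if (line.length : Int) + (item.toList.length : Int) ≤ line_length then
      -- line = line + " " + item ; words_rest.remove(item): item is always still present here,
      -- so Python's ValueError is unreachable (getD is never taken).
      -- `if words_rest is []` is an identity comparison with a fresh list: always False, dead branch.
      get_single_line_go line_length (line ++ [' '] ++ item.toList)
        ((PySem.List.remove? words_rest item).getD words_rest) tl
    else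
      -- final_line = line[1:len(line)]
      some (String.ofList (PySem.List.slice line (some 1) (some (line.length : Int))), words_rest)

def get_single_line (words : List String) (line_length : Int) : Option (String × List String) :=
  get_single_line_go line_length [] ([] ++ words) words

-- ===== PORT B =====
def get_single_line_alt_go (words : List String) (line_length : Int) (total : Int) (i : Nat) :
    List String → Option (String × List String)
  | [] => none
  | w :: tl =>
    let total' := total + (w.toList.length : Int) + 1
    if total' > line_length + 1 then
      some (PySem.Str.join " " (PySem.List.slice words none (some (i : Int))),
            PySem.List.slice words (some (i : Int)) none)
    else
      get_single_line_alt_go words line_length total' (i + 1) tl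

def get_single_line_alt (words : List String) (line_length : Int) : Option (String × List String) :=
  get_single_line_alt_go words line_length 0 0 words

-- ===== PRECONDITION & SPEC =====
def Spec_get_single_line (words : List String) (line_length : Int) (out : Option (String × List String)) : Prop := out = get_single_line_alt words line_length
instance (words : List String) (line_length : Int) (out : Option (String × List String)) : Decidable (Spec_get_single_line words line_length out) := by unfold Spec_get_single_line; infer_instance

-- ===== CLAIM (what is proved, stated in full; the proofs are below) =====
def Claim_equal_get_single_line : Prop := ∀ (words : List String) (line_length : Int), Dom_get_single_line words line_length → Spec_get_single_line words line_length (get_single_line words line_length)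

-- ===== LEMMAS AND PROOFS =====

-- A's accumulated line after accepting the words of p: " w1 w2 … wk" as a character list
def spaceLine (p : List String) : List Char := p.flatMap (fun w => ' ' :: w.toList)

theorem spaceLine_append_singleton (p : List String) (w : String) :
    spaceLine (p ++ [w]) = spaceLine p ++ [' '] ++ w.toList := by
  simp [spaceLine, List.append_assoc]

theorem intercalate_space_eq_drop (p : List String) :
    [' '].intercalate (p.map String.toList) = (spaceLine p).drop 1 := by
  induction p with
  | nil => simp [spaceLine, List.intercalate]
  | cons w ps ih =>
    cases ps with
    | nil => simp [spaceLine, List.intercalate]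
    | cons y ys =>
      have hstep : [' '].intercalate (w.toList :: String.toList y :: ys.map String.toList)
          = w.toList ++ [' '] ++ [' '].intercalate (String.toList y :: ys.map String.toList) := by
        simp [List.intercalate, List.intersperse]
      simp only [List.map_cons] at ih ⊢
      rw [hstep, ih]
      simp [spaceLine]

theorem join_space_eq (p : List String) :
    PySem.Str.join " " p = String.ofList ((spaceLine p).drop 1) := by
  have hsp : (" " : String).toList = [' '] := by decide
  simp [PySem.Str.join, PySem.Chars.join, hsp, intercalate_space_eq_drop]

theorem go_eq (L : Int) : ∀ (tl p : List String),
    get_single_line_go L (spaceLine p) tl tl =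
    get_single_line_alt_go (p ++ tl) L ((spaceLine p).length : Int) p.length tl := by
  intro tl
  induction tl with
  | nil => intro p; rfl
  | cons w tl ih =>
    intro p
    by_cases h : ((spaceLine p).length : Int) + (w.toList.length : Int) ≤ L
    · -- word accepted: both sides continue
      rw [get_single_line_go, if_pos h, get_single_line_alt_go]
      rw [if_neg (by omega)]
      have h2 := spaceLine_append_singleton p w
      have := ih (p ++ [w])
      rw [h2] at this
      have h3 : (((spaceLine p ++ [' '] ++ w.toList).length : Nat) : Int)
          = ((spaceLine p).length : Int) + (w.toList.length : Int) + 1 := by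
        simp only [List.length_append, List.length_singleton]; push_cast; ring
      rw [h3] at this
      simpa [PySem.List.remove?_cons_self] using this
    · -- word rejected: both sides return
      rw [get_single_line_go, if_neg h, get_single_line_alt_go]
      rw [if_pos (by omega)]
      have hsl : PySem.List.slice (spaceLine p) (some 1) (some ((spaceLine p).length : Int))
          = (spaceLine p).drop 1 := by
        rw [PySem.List.slice_toNat _ (by norm_num) (by positivity)]
        simp
      rw [hsl, PySem.List.slice_to_natCast, PySem.List.slice_from_natCast,
          List.take_left, List.drop_left, join_space_eq]

-- ===== VERDICT (by name: the statement is the Claim_ definition above) =====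
theorem get_single_line_spec : Claim_equal_get_single_line := by
  intro words L _
  unfold Spec_get_single_line get_single_line get_single_line_alt
  simpa using go_eq L words []
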